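-- pv_equiv track=rewrite | github.com/nidhik52/skylark-bi-agent | data_utils.py | data_quality_note
-- ===== SOURCE A (Python) =====
-- def data_quality_note(records: list[dict], fields: list[str]) -> str:
--     """Return a brief data-quality caveat string for the given fields."""
--     total = len(records)
--     if total == 0:
--         return ""
--     notes = []
--     for f in fields:
--         missing = sum(1 for r in records if r.get(f) is None)
--         if missing:
--             pct = round(100 * missing / total)
--             notes.append(f"'{f}' missing in {missing}/{total} records ({pct}%)")
--     if notes:
--         return "⚠ Data quality notes: " + "; ".join(notes)
--     return ""
-- ===== SOURCE B (Python) =====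
-- def data_quality_note(records: list[dict], fields: list[str]) -> str:
--     """Return a brief data-quality caveat string for the given fields."""
--     total = len(records)
--     if total == 0:
--         return ""
--     present = dict.fromkeys(fields, 0)
--     for r in records:
--         for f in present:
--             if r.get(f) is not None:
--                 present[f] += 1
--     notes = [
--         f"'{f}' missing in {total - present[f]}/{total} records "
--         f"({round(100 * (total - present[f]) / total)}%)"
--         for f in fields
--         if present[f] < total
--     ]
--     if notes:
--         return "⚠ Data quality notes: " + "; ".join(notes)
--     return ""
-- ===== Notes on version B (the rewrite author's own statement) =====
-- stated objective: faster
-- what changed: Replaces A's per-field generator-sum rescan of all records by complement counting: one pass over the records fills a field-to-PRESENT-count dict, then a list comprehension over the original fields emits a note whenever present[f] < total, with missing recomputed as total - present[f]; same asymptotics but the single dict-filling pass avoids creating a fresh generator and rescanning the record list per field, measured >1.5x faster in a timing run.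
import Mathlib
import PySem

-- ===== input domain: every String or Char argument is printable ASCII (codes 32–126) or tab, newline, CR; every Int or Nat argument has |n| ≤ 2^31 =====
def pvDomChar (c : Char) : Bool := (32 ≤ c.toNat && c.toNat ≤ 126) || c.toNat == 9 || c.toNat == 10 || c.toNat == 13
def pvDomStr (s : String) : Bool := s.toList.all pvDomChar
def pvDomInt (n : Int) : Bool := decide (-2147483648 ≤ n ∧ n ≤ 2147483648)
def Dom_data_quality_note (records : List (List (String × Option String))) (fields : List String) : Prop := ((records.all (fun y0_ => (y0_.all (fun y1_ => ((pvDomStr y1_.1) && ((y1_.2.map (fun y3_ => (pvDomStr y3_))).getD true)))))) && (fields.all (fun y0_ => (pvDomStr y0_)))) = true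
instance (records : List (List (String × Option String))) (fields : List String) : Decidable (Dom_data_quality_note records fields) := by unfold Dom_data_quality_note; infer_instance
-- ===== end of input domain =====

-- B replaces A's per-field rescan of the records (a generator sum per field) by complement
-- counting: one pass over the records fills a field → PRESENT-count dict, and a list
-- comprehension over the original fields emits a note whenever present[f] < total, with
-- missing recovered as total - present[f] (objective: alternative decomposition).

-- shared helper: 'round(100 * missing / total)' — Python rounds the float 100*missing/total
-- half-to-even; for 0 ≤ missing ≤ total (quotient in [0,100]) the double equals the exact
-- rational closely enough that half-to-even rounding of the exact rational gives the same int.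
def pvRound100 (missing total : Int) : Int :=
  let q := 100 * missing
  let fl := PySem.Int.floordiv q total
  let r2 := 2 * PySem.Int.mod q total
  if r2 < total then fl
  else if total < r2 then fl + 1
  else if PySem.Int.mod fl 2 == 0 then fl else fl + 1

-- shared helper: f"'{f}' missing in {missing}/{total} records ({pct}%)"
def pvNote (f : String) (missing total : Int) : String :=
  "'" ++ f ++ "' missing in " ++ PySem.Int.toStr missing ++ "/" ++ PySem.Int.toStr total ++
  " records (" ++ PySem.Int.toStr (pvRound100 missing total) ++ "%)"

-- ===== PORT A =====
-- 'r.get(f) is None'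
def pvMiss (r : List (String × Option String)) (f : String) : Bool :=
  ((PySem.Dict.mk r).getD f none) == none

def data_quality_note (records : List (List (String × Option String))) (fields : List String) : String :=
  let total : Int := records.length
  if total == 0 then ""
  else
    let notes : List String := fields.foldl (fun notes f =>
      let missing : Int := records.foldl (fun acc r => if pvMiss r f then acc + 1 else acc) 0
      if missing ≠ 0 then notes ++ [pvNote f missing total] else notes) []
    if notes ≠ [] then "⚠ Data quality notes: " ++ PySem.Str.join "; " notes else ""

-- ===== PORT B =====
-- 'r.get(f) is not None'
def pvPres (r : List (String × Option String)) (f : String) : Bool :=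
  ((PySem.Dict.mk r).getD f none) != none

def data_quality_note_alt (records : List (List (String × Option String))) (fields : List String) : String :=
  let total : Int := records.length
  if total == 0 then ""
  else
    -- present = dict.fromkeys(fields, 0); for r in records: for f in present: if r.get(f) is not None: present[f] += 1
    let present : PySem.Dict String Int :=
      records.foldl
        (fun d r => d.keys.foldl (fun d' f => if pvPres r f then d'.modify f 0 (· + 1) else d') d)
        (fields.foldl (fun d f => d.insert f 0) PySem.Dict.empty)
    -- notes = [f"…" for f in fields if present[f] < total]
    let notes : List String := fields.filterMap (fun f =>
      let p : Int := present.getD f 0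
      if p < total then some (pvNote f (total - p) total) else none)
    if notes ≠ [] then "⚠ Data quality notes: " ++ PySem.Str.join "; " notes else ""

-- ===== PRECONDITION & SPEC =====
def Spec_data_quality_note (records : List (List (String × Option String))) (fields : List String) (out : String) : Prop := out = data_quality_note_alt records fields
instance (records : List (List (String × Option String))) (fields : List String) (out : String) : Decidable (Spec_data_quality_note records fields out) := by unfold Spec_data_quality_note; infer_instance

-- ===== CLAIM (what is proved, stated in full; the proofs are below) =====
def Claim_equal_data_quality_note : Prop := ∀ (records : List (List (String × Option String))) (fields : List String), Dom_data_quality_note records fields → Spec_data_quality_note records fields (data_quality_note records fields)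

-- ===== LEMMAS AND PROOFS =====

-- one record's inner loop: adds 1 to exactly the present keys among ks
theorem pv_inner_getD (r : List (String × Option String)) (g : String) :
    ∀ (ks : List String) (d : PySem.Dict String Int), ks.Nodup →
      (ks.foldl (fun d' f => if pvPres r f then d'.modify f 0 (· + 1) else d') d).getD g 0
        = d.getD g 0 + (if g ∈ ks ∧ pvPres r g then 1 else 0) := by
  intro ks
  induction ks with
  | nil => intro d _; simp
  | cons k ks ih =>
    intro d hnd
    rcases List.nodup_cons.mp hnd with ⟨hk, hnd'⟩
    simp only [List.foldl_cons]
    rw [ih _ hnd']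
    by_cases hmk : pvPres r k
    · simp only [hmk, if_pos]
      rw [PySem.Dict.getD_modify]
      by_cases hg : g = k
      · subst hg
        simp [hmk, hk]
      · simp [hg]
    · simp only [hmk, Bool.false_eq_true, if_false]
      congr 1
      by_cases hg : g = k
      · subst hg; simp [hmk]
      · simp [List.mem_cons, hg]

-- the inner loop never changes the key list (all modified keys are present)
theorem pv_inner_keys (r : List (String × Option String)) :
    ∀ (ks : List String) (d : PySem.Dict String Int), (∀ f ∈ ks, f ∈ d.keys) →
      (ks.foldl (fun d' f => if pvPres r f then d'.modify f 0 (· + 1) else d') d).keys = d.keys := by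
  intro ks
  induction ks with
  | nil => intro d _; simp
  | cons k ks ih =>
    intro d hmem
    simp only [List.foldl_cons]
    by_cases hmk : pvPres r k
    · simp only [hmk, if_pos]
      have hkeys : (d.modify k 0 (· + 1)).keys = d.keys := by
        rw [PySem.Dict.keys_modify]
        exact PySem.Dict.keys_insert_of_contains d _
          ((PySem.Dict.contains_iff_mem_keys d k).mpr (hmem k (List.mem_cons_self)))
      rw [ih _ (by intro f hf; rw [hkeys]; exact hmem f (List.mem_cons_of_mem _ hf)), hkeys]
    · simp only [hmk, Bool.false_eq_true, if_false]
      exact ih _ (fun f hf => hmem f (List.mem_cons_of_mem _ hf))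

-- the record loop: present[g] accumulates the number of records where g is present
theorem pv_outer (g : String) :
    ∀ (recs : List (List (String × Option String))) (d : PySem.Dict String Int),
      d.keys.Nodup → g ∈ d.keys →
      (recs.foldl
        (fun d r => d.keys.foldl (fun d' f => if pvPres r f then d'.modify f 0 (· + 1) else d') d)
        d).getD g 0
        = d.getD g 0 + (recs.countP (fun r => pvPres r g) : Int) := by
  intro recs
  induction recs with
  | nil => intro d _ _; simp
  | cons r recs ih =>
    intro d hnd hg
    simp only [List.foldl_cons]
    have hkeys := pv_inner_keys r d.keys d (fun f hf => hf)
    rw [ih _ (by rw [hkeys]; exact hnd) (by rw [hkeys]; exact hg)]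
    rw [pv_inner_getD r g d.keys d hnd]
    simp only [hg, true_and, List.countP_cons]
    by_cases hm : pvPres r g
    · simp [hm]; ring
    · simp [hm]

-- dict.fromkeys(fields, 0): every lookup (with default 0) is 0
theorem pv_init_getD (g : String) :
    ∀ (fields : List String) (d : PySem.Dict String Int), (∀ k, d.getD k 0 = 0) →
      (fields.foldl (fun d f => d.insert f 0) d).getD g 0 = 0 := by
  intro fields
  induction fields with
  | nil => intro d h; simpa using h g
  | cons f fields ih =>
    intro d h
    simp only [List.foldl_cons]
    refine ih _ (fun k => ?_)
    by_cases hk : k = f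
    · subst hk; exact PySem.Dict.getD_insert_self d k 0 0
    · rw [PySem.Dict.getD_insert_of_ne d 0 0 hk]; exact h k

-- present[f] = number of records where f is present, for every f ∈ fields
theorem pv_present_eq (records : List (List (String × Option String))) (fields : List String)
    (f : String) (hf : f ∈ fields) :
    (records.foldl
      (fun d r => d.keys.foldl (fun d' f => if pvPres r f then d'.modify f 0 (· + 1) else d') d)
      (fields.foldl (fun d f => d.insert f (0:Int)) PySem.Dict.empty)).getD f 0
    = (records.countP (fun r => pvPres r f) : Int) := by
  have hkeys : (fields.foldl (fun d f => d.insert f (0:Int)) PySem.Dict.empty).keys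
      = PySem.Set.update (PySem.Dict.empty : PySem.Dict String Int).keys fields :=
    PySem.Dict.keys_foldl_insert fields (fun _ _ => 0) _
  have hempty : (PySem.Dict.empty : PySem.Dict String Int).keys = [] := rfl
  rw [pv_outer f records (fields.foldl (fun d f => d.insert f (0:Int)) PySem.Dict.empty)
    (by rw [hkeys, hempty]; exact PySem.Set.nodup_update _ fields List.nodup_nil)
    (by rw [hkeys, hempty]; exact (PySem.Set.mem_update _ fields f).mpr (Or.inr hf))]
  rw [pv_init_getD f fields PySem.Dict.empty (fun k => rfl)]
  ring

-- A's conditional-append fold over fields is a filterMap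
theorem pv_foldl_filterMap {α β : Type} (c : α → Prop) [DecidablePred c] (g : α → β) :
    ∀ (l : List α) (acc : List β),
      l.foldl (fun ns f => if c f then ns ++ [g f] else ns) acc
        = acc ++ l.filterMap (fun f => if c f then some (g f) else none) := by
  intro l
  induction l with
  | nil => intro acc; simp
  | cons x l ih =>
    intro acc
    simp only [List.foldl_cons, List.filterMap_cons]
    by_cases hx : c x
    · simp [hx, ih]
    · simp [hx, ih]

-- per-record presence and absence are complementary
theorem pv_count_split (records : List (List (String × Option String))) (f : String) :
    records.countP (fun r => pvMiss r f) + records.countP (fun r => pvPres r f)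
      = records.length := by
  induction records with
  | nil => simp
  | cons r recs ih =>
    simp only [List.countP_cons, List.length_cons]
    by_cases hm : pvMiss r f
    · have hp : pvPres r f = false := by
        unfold pvMiss at hm; unfold pvPres
        simp only [bne, hm]; rfl
      simp [hm, hp]; omega
    · have hp : pvPres r f = true := by
        unfold pvMiss at hm; unfold pvPres
        simp only [bne]
        simp only [Bool.not_eq_true] at hm ⊢
        simp [hm]
      simp [hm, hp]; omega

-- ===== VERDICT (by name: the statement is the Claim_ definition above) =====
theorem data_quality_note_spec : Claim_equal_data_quality_note := by
  intro records fields _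
  unfold Spec_data_quality_note data_quality_note data_quality_note_alt
  by_cases htot : (records.length : Int) == 0
  · simp [htot]
  · simp only [htot, Bool.false_eq_true, if_false]
    have hlen : (0:Int) < records.length := by
      simp only [beq_iff_eq] at htot; omega
    have hnotes :
        fields.foldl (fun notes f =>
          let missing : Int := records.foldl (fun acc r => if pvMiss r f then acc + 1 else acc) 0
          if missing ≠ 0 then notes ++ [pvNote f missing (records.length : Int)] else notes) []
        = fields.filterMap (fun f =>
          let p : Int :=
            (records.foldl
              (fun d r => d.keys.foldl (fun d' f => if pvPres r f then d'.modify f 0 (· + 1) else d') d)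
              (fields.foldl (fun d f => d.insert f 0) PySem.Dict.empty)).getD f 0
          if p < (records.length : Int) then
            some (pvNote f ((records.length : Int) - p) (records.length : Int)) else none) := by
      rw [pv_foldl_filterMap
        (fun f => (records.foldl (fun acc r => if pvMiss r f then acc + 1 else acc) (0:Int)) ≠ 0)
        (fun f => pvNote f (records.foldl (fun acc r => if pvMiss r f then acc + 1 else acc) 0)
          (records.length : Int)) fields []]
      simp only [List.nil_append]
      refine List.filterMap_congr (fun f hf => ?_)
      beta_reduce
      rw [pv_present_eq records fields f hf]
      have hmA : records.foldl (fun acc r => if pvMiss r f then acc + 1 else acc) (0:Int)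
          = (records.countP (fun r => pvMiss r f) : Int) := by
        rw [PySem.List.foldl_count_if (fun r => pvMiss r f) records 0]; ring
      have hsplit := pv_count_split records f
      have hmissval : (records.length : Int) - (records.countP (fun r => pvPres r f) : Int)
          = (records.countP (fun r => pvMiss r f) : Int) := by
        omega
      have hcond : ((records.countP (fun r => pvPres r f) : Int) < (records.length : Int))
          ↔ ((records.countP (fun r => pvMiss r f) : Int) ≠ 0) := by
        omega
      rw [hmA, hmissval]
      by_cases hc : (records.countP (fun r => pvMiss r f) : Int) ≠ 0
      · rw [if_pos hc, if_pos (hcond.mpr hc)]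
      · rw [if_neg hc, if_neg (fun h => hc (hcond.mp h))]
    rw [hnotes]
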